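-- pv_equiv track=rewrite | github.com/jenniezheng/Coding_Competitions | NAQ/scramble.py | encrypt_str
-- ===== SOURCE A (Python) =====
-- def encrypt_str(mstr):
--     converted=[]
--     for num in range(len(mstr)):
--         if(mstr[num]==' '):
--             converted.append(0)
--         else:
--             converted.append(ord(mstr[num])-ord('a')+1)
--     for i in range(1,len(mstr)):
--         converted[i]+=converted[i-1]
--     for i in range(0,len(mstr)):
--         converted[i]%=27
--     for i in range(0,len(mstr)):
--         if(converted[i]==0):
--             converted[i]=' '
--         else:
--             converted[i]=chr(converted[i]+ord('a')-1)
--     return converted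
-- ===== SOURCE B (Python) =====
-- def encrypt_str(mstr):
--     # Right-to-left: recover each prefix total by subtracting values from the
--     # full sum, building the output back-to-front, then reverse.
--     vals = [0 if c == ' ' else ord(c) - ord('a') + 1 for c in mstr]
--     remaining = sum(vals)
--     out = []
--     for v in reversed(vals):
--         t = remaining % 27
--         out.append(' ' if t == 0 else chr(t + ord('a') - 1))
--         remaining -= v
--     out.reverse()
--     return out
-- ===== Notes on version B (the rewrite author's own statement) =====
-- stated objective: alternative
-- what changed: Instead of A's four forward passes (convert, in-place prefix sum, in-place mod 27, in-place remap), B computes the total value-sum once and scans the string right-to-left, recovering each prefix total by subtracting values from the running remainder and building the output back-to-front, reversing at the end.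
import Mathlib
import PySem

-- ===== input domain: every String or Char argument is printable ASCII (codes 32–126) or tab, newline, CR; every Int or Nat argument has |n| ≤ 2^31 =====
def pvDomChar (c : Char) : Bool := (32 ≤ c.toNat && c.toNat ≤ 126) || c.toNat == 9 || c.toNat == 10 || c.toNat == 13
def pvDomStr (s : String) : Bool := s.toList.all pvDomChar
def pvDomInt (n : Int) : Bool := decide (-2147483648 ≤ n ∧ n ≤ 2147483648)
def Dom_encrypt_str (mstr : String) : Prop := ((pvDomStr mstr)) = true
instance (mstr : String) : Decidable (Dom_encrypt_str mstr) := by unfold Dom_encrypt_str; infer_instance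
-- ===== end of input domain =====

-- B replaces A's four forward passes by a single right-to-left scan that recovers each
-- prefix total by subtracting values from the full sum, building the output back-to-front;
-- objective: alternative (same O(n) cost, different traversal order).

-- ===== PORT A =====
def encrypt_str (mstr : String) : List String :=
  let chars := mstr.toList
  let n := chars.length
  -- pass 1: convert each character to its numeric value
  let conv1 : List Int :=
    (List.range n).foldl (fun conv num =>
      if chars.getD num ' ' = ' ' then conv ++ [(0 : Int)]
      else conv ++ [((chars.getD num ' ').toNat : Int) - 97 + 1]) []
  -- pass 2: in-place prefix sums  (range(1, n))
  let conv2 : List Int :=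
    (List.range' 1 (n - 1)).foldl (fun conv i =>
      conv.set i (conv.getD i 0 + conv.getD (i - 1) 0)) conv1
  -- pass 3: in-place mod 27
  let conv3 : List Int :=
    (List.range n).foldl (fun conv i =>
      conv.set i (PySem.Int.mod (conv.getD i 0) 27)) conv2
  -- pass 4: in-place remap to output characters (each slot is written exactly once,
  -- reading the pre-pass value, so building the result list left to right is exact)
  (List.range n).foldl (fun out i =>
    if conv3.getD i 0 = 0 then out ++ [" "]
    else out ++ [String.ofList [Char.ofNat (conv3.getD i 0 + 97 - 1).toNat]]) []

-- ===== PORT B =====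
def encrypt_str_alt (mstr : String) : List String :=
  let vals : List Int :=
    mstr.toList.map (fun c => if c = ' ' then (0 : Int) else (c.toNat : Int) - 97 + 1)
  let out :=
    (vals.reverse.foldl
      (fun (st : Int × List String) v =>
        let t := PySem.Int.mod st.1 27
        (st.1 - v,
         st.2 ++ [if t = 0 then " " else String.ofList [Char.ofNat (t + 97 - 1).toNat]]))
      (vals.sum, ([] : List String))).2
  out.reverse

-- ===== PRECONDITION & SPEC =====
def Spec_encrypt_str (mstr : String) (out : List String) : Prop := out = encrypt_str_alt mstr
instance (mstr : String) (out : List String) : Decidable (Spec_encrypt_str mstr out) := by unfold Spec_encrypt_str; infer_instance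

-- ===== CLAIM (what is proved, stated in full; the proofs are below) =====
def Claim_equal_encrypt_str : Prop := ∀ (mstr : String), Dom_encrypt_str mstr → Spec_encrypt_str mstr (encrypt_str mstr)

-- ===== LEMMAS AND PROOFS =====

/-- value of a character -/
def pvVal (c : Char) : Int := if c = ' ' then 0 else (c.toNat : Int) - 97 + 1

/-- output string for a reduced total -/
def pvOut (t : Int) : String := if t = 0 then " " else String.ofList [Char.ofNat (t + 97 - 1).toNat]

/-- prefix sums starting from accumulator `a` -/
def pvPs (a : Int) : List Int → List Int
  | [] => []
  | x :: xs => (a + x) :: pvPs (a + x) xs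

/-- B's per-step outputs: emit `pvOut (R % 27)`, then subtract the value -/
def pvDown (R : Int) : List Int → List String
  | [] => []
  | v :: vs => pvOut (PySem.Int.mod R 27) :: pvDown (R - v) vs

theorem pvPs_length (a : Int) (l : List Int) : (pvPs a l).length = l.length := by
  induction l generalizing a with
  | nil => rfl
  | cons x xs ih => simp [pvPs, ih]

theorem pvPs_append (a : Int) (xs ys : List Int) :
    pvPs a (xs ++ ys) = pvPs a xs ++ pvPs (a + xs.sum) ys := by
  induction xs generalizing a with
  | nil => simp [pvPs]
  | cons x xs ih => simp [pvPs, ih, add_assoc]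

theorem pvPs_getD (a : Int) (l : List Int) (i : Nat) (h : i < l.length) :
    (pvPs a l).getD i 0 = a + (l.take (i + 1)).sum := by
  induction l generalizing a i with
  | nil => simp at h
  | cons x xs ih =>
    cases i with
    | zero => simp [pvPs]
    | succ j =>
      simp only [pvPs, List.getD_cons_succ, List.take_succ_cons, List.sum_cons]
      rw [ih (a + x) j (by simpa using h)]
      ring

/-- generic append-building pass over `range k` reading `l.getD` -/
theorem pvFoldl_range_append {α β : Type} (f : α → β) (d : α) (l : List α) :
    ∀ (k : Nat), k ≤ l.length → ∀ (acc : List β),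
      (List.range k).foldl (fun out i => out ++ [f (l.getD i d)]) acc
        = acc ++ (l.take k).map f := by
  intro k
  induction k with
  | zero => intro _ acc; simp
  | succ j ih =>
    intro hk acc
    have hj : j < l.length := by omega
    rw [List.range_succ, List.foldl_append, ih (by omega) acc]
    simp only [List.foldl_cons, List.foldl_nil]
    have hg : l.getD j d = l[j] := by
      rw [List.getD_eq_getElem?_getD, List.getElem?_eq_getElem hj]; rfl
    rw [hg, ← List.take_concat_get hj, List.concat_eq_append, List.map_append,
      List.append_assoc]
    simp

/-- pass 2 computes prefix sums -/
theorem pvPass2 (l : List Int) :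
    (List.range' 1 (l.length - 1)).foldl
      (fun conv i => conv.set i (conv.getD i 0 + conv.getD (i - 1) 0)) l = pvPs 0 l := by
  -- invariant: after indices 1..k, list = pvPs 0 (take (k+1)) ++ drop (k+1)
  have inv : ∀ (k : Nat), k + 1 ≤ l.length →
      (List.range' 1 k).foldl
        (fun conv i => conv.set i (conv.getD i 0 + conv.getD (i - 1) 0)) l
        = pvPs 0 (l.take (k + 1)) ++ l.drop (k + 1) := by
    intro k
    induction k with
    | zero =>
      intro hk
      rcases l with _ | ⟨x, xs⟩
      · simp at hk
      · simp [pvPs]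
    | succ j ih =>
      intro hk
      have hj1 : j + 1 < l.length := by omega
      have hPlen : (pvPs 0 (l.take (j + 1))).length = j + 1 := by
        rw [pvPs_length, List.length_take]; omega
      rw [List.range'_1_concat, List.foldl_append, ih (by omega)]
      simp only [List.foldl_cons, List.foldl_nil]
      have h1j : 1 + j = j + 1 := by omega
      rw [h1j]
      have hsub : j + 1 - 1 = j := rfl
      rw [hsub]
      have hget1 : (pvPs 0 (l.take (j + 1)) ++ l.drop (j + 1)).getD (j + 1) 0 = l[j + 1] := by
        rw [List.getD_append_right _ _ 0 (j + 1) (le_of_eq hPlen), hPlen,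
          Nat.sub_self, List.getD_eq_getElem?_getD, List.getElem?_drop,
          List.getElem?_eq_getElem (by omega : j + 1 + 0 < l.length)]
        rfl
      have hget0 : (pvPs 0 (l.take (j + 1)) ++ l.drop (j + 1)).getD j 0
          = (l.take (j + 1)).sum := by
        rw [List.getD_append _ _ 0 j (by omega), pvPs_getD 0 _ j (by rw [List.length_take]; omega),
          List.take_take]
        simp
      rw [hget1, hget0,
        List.set_append_right (j + 1) _ (le_of_eq hPlen), hPlen, Nat.sub_self,
        List.drop_eq_getElem_cons hj1, List.set_cons_zero,
        show l.take (j + 1 + 1) = (l.take (j + 1)).concat l[j + 1] from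
          (List.take_concat_get hj1).symm,
        List.concat_eq_append, pvPs_append]
      simp [pvPs]
      ring
  rcases Nat.eq_zero_or_pos l.length with h0 | hpos
  · rw [List.eq_nil_of_length_eq_zero h0]; rfl
  · have h := inv (l.length - 1) (by omega)
    rw [h, show l.length - 1 + 1 = l.length from by omega]
    simp

/-- pass 3: in-place map via set -/
theorem pvPass3 (m : Int → Int) (l : List Int) :
    ∀ (k : Nat), k ≤ l.length →
      (List.range k).foldl (fun conv i => conv.set i (m (conv.getD i 0))) l
        = (l.take k).map m ++ l.drop k := by
  intro k
  induction k with
  | zero => intro _; simp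
  | succ j ih =>
    intro hk
    have hj : j < l.length := by omega
    have hmlen : ((l.take j).map m).length = j := by
      rw [List.length_map, List.length_take]; omega
    rw [List.range_succ, List.foldl_append, ih (by omega)]
    simp only [List.foldl_cons, List.foldl_nil]
    have hget : ((l.take j).map m ++ l.drop j).getD j 0 = l[j] := by
      rw [List.getD_append_right _ _ 0 j (le_of_eq hmlen), hmlen, Nat.sub_self,
        List.getD_eq_getElem?_getD, List.getElem?_drop,
        List.getElem?_eq_getElem (by omega : j + 0 < l.length)]
      rfl
    rw [hget, List.set_append_right j _ (le_of_eq hmlen), hmlen, Nat.sub_self,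
      List.drop_eq_getElem_cons hj, List.set_cons_zero,
      show l.take (j + 1) = (l.take j).concat l[j] from (List.take_concat_get hj).symm,
      List.concat_eq_append, List.map_append]
    simp

/-- A as a composition of the four passes in closed form -/
theorem pvA_closed (mstr : String) :
    encrypt_str mstr
      = ((pvPs 0 (mstr.toList.map pvVal)).map (fun x => PySem.Int.mod x 27)).map pvOut := by
  unfold encrypt_str
  set chars := mstr.toList with hchars
  simp only []
  -- pass 1
  have hf1 : (fun (conv : List Int) num =>
      if chars.getD num ' ' = ' ' then conv ++ [(0 : Int)]
      else conv ++ [((chars.getD num ' ').toNat : Int) - 97 + 1])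
      = fun conv num => conv ++ [pvVal (chars.getD num ' ')] := by
    funext conv num
    unfold pvVal
    by_cases h : chars.getD num ' ' = ' '
    · rw [if_pos h, if_pos h]
    · rw [if_neg h, if_neg h]
  rw [hf1, pvFoldl_range_append pvVal ' ' chars chars.length (le_refl _) [],
    List.take_length, List.nil_append]
  -- pass 2
  have hlen1 : (chars.map pvVal).length = chars.length := List.length_map ..
  rw [show chars.length - 1 = (chars.map pvVal).length - 1 from by rw [hlen1],
    pvPass2 (chars.map pvVal)]
  -- pass 3
  have hlen2 : (pvPs 0 (chars.map pvVal)).length = chars.length := by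
    rw [pvPs_length, hlen1]
  rw [pvPass3 (fun x => PySem.Int.mod x 27) (pvPs 0 (chars.map pvVal)) chars.length
      (le_of_eq hlen2.symm),
    List.take_of_length_le (le_of_eq hlen2), List.drop_of_length_le (le_of_eq hlen2),
    List.append_nil]
  -- pass 4
  set L := (pvPs 0 (chars.map pvVal)).map (fun x => PySem.Int.mod x 27) with hLdef
  have hlen3 : L.length = chars.length := by rw [hLdef, List.length_map, hlen2]
  have hf4 : (fun (out : List String) i =>
      if L.getD i 0 = 0 then out ++ [" "]
      else out ++ [String.ofList [Char.ofNat (L.getD i 0 + 97 - 1).toNat]])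
      = fun out i => out ++ [pvOut (L.getD i 0)] := by
    funext out i
    unfold pvOut
    by_cases h : L.getD i 0 = 0
    · rw [if_pos h, if_pos h]
    · rw [if_neg h, if_neg h]
  rw [hf4, pvFoldl_range_append pvOut 0 L chars.length (le_of_eq hlen3.symm) [],
    List.take_of_length_le (le_of_eq hlen3), List.nil_append]

/-- B's fold emits `pvDown` -/
theorem pvAltFold (m : List Int) :
    ∀ (R : Int) (acc : List String),
      (m.foldl
        (fun (st : Int × List String) v =>
          let t := PySem.Int.mod st.1 27
          (st.1 - v,
           st.2 ++ [if t = 0 then " " else String.ofList [Char.ofNat (t + 97 - 1).toNat]]))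
        (R, acc)).2
      = acc ++ pvDown R m := by
  induction m with
  | nil => intro R acc; simp [pvDown]
  | cons v vs ih =>
    intro R acc
    simp only [List.foldl_cons, pvDown]
    rw [ih]
    simp [pvOut]

theorem pvDown_append (R : Int) (m m' : List Int) :
    pvDown R (m ++ m') = pvDown R m ++ pvDown (R - m.sum) m' := by
  induction m generalizing R with
  | nil => simp [pvDown]
  | cons v vs ih => simp [pvDown, ih, sub_sub]

/-- right-to-left subtraction scan equals the reversed prefix-sum map -/
theorem pvDown_reverse (l : List Int) :
    ∀ (a : Int),
      pvDown (a + l.sum) l.reverse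
        = (((pvPs a l).map (fun x => PySem.Int.mod x 27)).map pvOut).reverse := by
  induction l with
  | nil => intro a; simp [pvDown, pvPs]
  | cons x xs ih =>
    intro a
    simp only [List.reverse_cons, List.sum_cons, pvPs, List.map_cons, List.reverse_cons]
    rw [show a + (x + xs.sum) = (a + x) + xs.sum from by ring,
      pvDown_append, ih (a + x)]
    simp [pvDown]

-- ===== VERDICT (by name: the statement is the Claim_ definition above) =====
theorem encrypt_str_spec : Claim_equal_encrypt_str := by
  intro mstr _
  unfold Spec_encrypt_str encrypt_str_alt
  simp only []
  rw [show (fun c => if c = ' ' then (0 : Int) else (c.toNat : Int) - 97 + 1) = pvVal from rfl,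
    pvAltFold, List.nil_append,
    show (mstr.toList.map pvVal).sum = 0 + (mstr.toList.map pvVal).sum from by ring,
    pvDown_reverse, List.reverse_reverse, pvA_closed]
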